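-- pv_equiv track=rewrite | github.com/IbroIT/SU_med_front | scripts/final_duplicate_cleaner.py | find_section_end
-- ===== SOURCE A (Python) =====
-- def find_section_end(lines, start_line):
--     """
--     Находит конец JSON раздела, начинающегося с start_line
--     """
--     if start_line >= len(lines):
--         return start_line
--
--     # Считаем уровень вложенности скобок
--     brace_count = 0
--     in_section = False
--
--     for i in range(start_line, len(lines)):
--         line = lines[i]
--
--         # Начинаем считать скобки после первой открывающей скобки раздела
--         if '{' in line and not in_section:
--             in_section = True
--
--         if in_section:
--             # Считаем открывающие и закрывающие скобки
--             brace_count += line.count('{')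
--             brace_count -= line.count('}')
--
--             # Если скобки сбалансированы, значит раздел закончился
--             if brace_count == 0:
--                 return i
--
--     # Если не нашли конец, возвращаем последнюю строку
--     return len(lines) - 1
-- ===== SOURCE B (Python) =====
-- def find_section_end(lines, start_line):
--     n = len(lines)
--     if start_line >= n:
--         return start_line
--     # Phase 1: locate the first line at or after start_line that contains '{'
--     hit = [i for i in range(start_line, n) if '{' in lines[i]]
--     if not hit:
--         return n - 1
--     j = hit[0]
--     # Phase 2: tabulate cumulative brace balances from line j onward
--     balances = []
--     total = 0
--     for line in lines[j:]:
--         total += line.count('{') - line.count('}')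
--         balances.append(total)
--     # Phase 3: first index whose cumulative balance is zero ends the section
--     if 0 in balances:
--         return j + balances.index(0)
--     return n - 1
-- ===== Notes on version B (the rewrite author's own statement) =====
-- stated objective: alternative
-- what changed: Replaces A's single gated loop with an in_section flag and early return by a three-phase decomposition: locate the first '{'-line by filtering the index range, tabulate the whole cumulative brace-balance table from it, then return the first index whose balance is zero via list membership/index.
-- outside the precondition, e.g. on find_section_end(['}', '{'], -2): A returns 0, B returns 1
import Mathlib
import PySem

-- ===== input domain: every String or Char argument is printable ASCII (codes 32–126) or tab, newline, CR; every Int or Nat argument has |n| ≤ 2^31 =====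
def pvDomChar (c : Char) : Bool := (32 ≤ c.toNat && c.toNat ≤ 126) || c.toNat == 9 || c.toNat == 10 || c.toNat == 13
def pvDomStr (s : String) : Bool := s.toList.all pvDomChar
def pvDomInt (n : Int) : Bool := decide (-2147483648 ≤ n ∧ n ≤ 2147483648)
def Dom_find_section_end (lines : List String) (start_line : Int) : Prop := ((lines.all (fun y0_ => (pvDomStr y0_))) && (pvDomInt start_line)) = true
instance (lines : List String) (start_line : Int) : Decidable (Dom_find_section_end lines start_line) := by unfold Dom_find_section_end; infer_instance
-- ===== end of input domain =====

-- B replaces A's single gated scan (in_section flag + early return) by a locate/tabulate/scan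
-- decomposition (filter the index range for the first '{'-line, build the full cumulative-balance
-- table, then take the first zero); same cost, proved equal for 0 ≤ start_line.


-- ===== PORT A =====
-- loop body of A: state = (brace_count, in_section, early-return value if any)
def fsaStep (lines : List String) (st : Int × Bool × Option Int) (i : Int) : Int × Bool × Option Int :=
  match st.2.2 with
  | some _ => st
  | none =>
    let line := PySem.List.pyGetD lines i ""
    let ins := if PySem.Str.isIn "{" line && !st.2.1 then true else st.2.1
    if ins then
      let bc := st.1 + (PySem.Str.count line "{" : Int) - (PySem.Str.count line "}" : Int)
      if bc = 0 then (bc, ins, some i) else (bc, ins, none)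
    else (st.1, ins, none)

def find_section_end (lines : List String) (start_line : Int) : Int :=
  if start_line ≥ (lines.length : Int) then start_line
  else
    match ((PySem.List.pyRange start_line (lines.length : Int) 1).foldl (fsaStep lines) (0, false, none)).2.2 with
    | some i => i
    | none => (lines.length : Int) - 1

-- ===== PORT B =====
-- 'balances.append(total)' body of B's tabulating loop: state = (balances, total)
def fsbAcc (acc : List Int × Int) (line : String) : List Int × Int :=
  let t := acc.2 + (PySem.Str.count line "{" : Int) - (PySem.Str.count line "}" : Int)
  (acc.1 ++ [t], t)

def find_section_end_alt (lines : List String) (start_line : Int) : Int :=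
  let n : Int := lines.length
  if start_line ≥ n then start_line
  else
    match (PySem.List.pyRange start_line n 1).filter
        (fun i => PySem.Str.isIn "{" (PySem.List.pyGetD lines i "")) with
    | [] => n - 1
    | j :: _ =>
      let balances := ((PySem.List.slice lines (some j) none).foldl fsbAcc ([], 0)).1
      match PySem.List.index? balances 0 with
      | some k => j + (k : Int)
      | none => n - 1

-- ===== PRECONDITION & SPEC =====
-- Pre_ restricts to the natural domain of a line index: it excludes negative start_line, where A
-- either raises IndexError (start_line < -len(lines)) or relies on accidental negative-index
-- wraparound that mixes wrapped and plain indices.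
def Pre_find_section_end (lines : List String) (start_line : Int) : Prop := 0 ≤ start_line
instance (lines : List String) (start_line : Int) : Decidable (Pre_find_section_end lines start_line) := by unfold Pre_find_section_end; infer_instance

def pvWitness_find_section_end : List String × Int := (["\"a\": {", "  \"b\": 1", "}"], 0)

def Spec_find_section_end (lines : List String) (start_line : Int) (out : Int) : Prop := out = find_section_end_alt lines start_line
instance (lines : List String) (start_line : Int) (out : Int) : Decidable (Spec_find_section_end lines start_line out) := by unfold Spec_find_section_end; infer_instance

-- ===== CLAIM (what is proved, stated in full; the proofs are below) =====
def Claim_equal_find_section_end : Prop := ∀ (lines : List String) (start_line : Int), Dom_find_section_end lines start_line → Pre_find_section_end lines start_line → Spec_find_section_end lines start_line (find_section_end lines start_line)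

-- ===== LEMMAS AND PROOFS =====

-- per-line brace delta
def pvDelta (l : String) : Int := (PySem.Str.count l "{" : Int) - (PySem.Str.count l "}" : Int)

-- A's loop, recursing over the suffix of lines together with its running index
def pvStepA : List String → Int → (Int × Bool × Option Int) → (Int × Bool × Option Int)
  | [], _, st => st
  | l :: ls, i, st =>
    pvStepA ls (i + 1)
      (match st.2.2 with
       | some _ => st
       | none =>
         let ins := if PySem.Str.isIn "{" l && !st.2.1 then true else st.2.1
         if ins then
           let bc := st.1 + pvDelta l
           if bc = 0 then (bc, ins, some i) else (bc, ins, none)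
         else (st.1, ins, none))

-- the balance scan after the section has started
def pvGoC : List String → Int → Int → Option Int
  | [], _, _ => none
  | l :: ls, i, bc => if bc + pvDelta l = 0 then some i else pvGoC ls (i + 1) (bc + pvDelta l)

-- B's cumulative-balance table
def pvBals : List String → Int → List Int
  | [], _ => []
  | l :: ls, bc => (bc + pvDelta l) :: pvBals ls (bc + pvDelta l)

theorem pvStepA_some (ls : List String) (i bc : Int) (ins : Bool) (r : Int) :
    pvStepA ls i (bc, ins, some r) = (bc, ins, some r) := by
  induction ls generalizing i with
  | nil => rfl
  | cons l t ih => simp [pvStepA, ih]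

theorem pvBridgeA (lines : List String) :
    ∀ (k : Nat) (s : Int) (st : Int × Bool × Option Int), 0 ≤ s → lines.length - s.toNat = k →
      (PySem.List.pyRange s (lines.length : Int) 1).foldl (fsaStep lines) st
        = pvStepA (lines.drop s.toNat) s st := by
  intro k
  induction k with
  | zero =>
    intro s st hs hk
    have hge : (lines.length : Int) ≤ s := by omega
    rw [PySem.List.pyRange_one_eq_nil hge, List.drop_eq_nil_of_le (by omega)]
    rfl
  | succ k ih =>
    intro s st hs hk
    have hlt : s < (lines.length : Int) := by omega
    have hlt' : s.toNat < lines.length := by omega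
    have hget : PySem.List.pyGetD lines s "" = lines[s.toNat] :=
      PySem.List.pyGetD_eq_getElem lines "" (by omega) hlt
    have hnat : (s + 1).toNat = s.toNat + 1 := by omega
    rw [PySem.List.pyRange_one_cons hlt, List.foldl_cons,
      ih (s + 1) _ (by omega) (by omega), hnat]
    conv_rhs => rw [List.drop_eq_getElem_cons hlt', pvStepA]
    rw [← hnat]
    congr 1
    simp only [fsaStep, pvDelta, hget, Int.add_sub_assoc]

theorem pvStepA_true (ls : List String) :
    ∀ (i bc : Int), (pvStepA ls i (bc, true, none)).2.2 = pvGoC ls i bc := by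
  induction ls with
  | nil => intro i bc; rfl
  | cons l t ih =>
    intro i bc
    by_cases h : bc + pvDelta l = 0
    · simp [pvStepA, pvGoC, h, pvStepA_some]
    · simp [pvStepA, pvGoC, h, ih]

theorem pvGoC_index (ls : List String) :
    ∀ (i bc : Int), pvGoC ls i bc
      = (PySem.List.index? (pvBals ls bc) 0).map (fun (k : Nat) => i + (k : Int)) := by
  induction ls with
  | nil => intro i bc; rfl
  | cons l t ih =>
    intro i bc
    by_cases h : bc + pvDelta l = 0
    · simp only [pvGoC, pvBals, h]
      rw [PySem.List.index?_cons_self]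
      simp
    · simp only [pvGoC, pvBals, if_neg h]
      rw [PySem.List.index?_cons_of_ne _ (by simpa using h), ih]
      cases PySem.List.index? (pvBals t (bc + pvDelta l)) 0 with
      | none => rfl
      | some k => simp [Option.map]; ring

theorem pvBalsFold (ls : List String) :
    ∀ (acc : List Int) (bc : Int), (ls.foldl fsbAcc (acc, bc)).1 = acc ++ pvBals ls bc := by
  induction ls with
  | nil => intro acc bc; simp [pvBals]
  | cons l t ih =>
    intro acc bc
    rw [List.foldl_cons,
      show fsbAcc (acc, bc) l = (acc ++ [bc + pvDelta l], bc + pvDelta l) by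
        simp only [fsbAcc, pvDelta, Int.add_sub_assoc],
      ih, pvBals]
    simp

-- the central correspondence: A's scan from s equals B's locate-then-scan from s
theorem pvMain (lines : List String) :
    ∀ (k : Nat) (s : Int), 0 ≤ s → lines.length - s.toNat = k →
      (match (pvStepA (lines.drop s.toNat) s (0, false, none)).2.2 with
       | some i => i
       | none => (lines.length : Int) - 1)
      = (match (PySem.List.pyRange s (lines.length : Int) 1).filter
            (fun i => PySem.Str.isIn "{" (PySem.List.pyGetD lines i "")) with
         | [] => (lines.length : Int) - 1
         | j :: _ =>
           match PySem.List.index? (pvBals (lines.drop j.toNat) 0) 0 with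
           | some k => j + (k : Int)
           | none => (lines.length : Int) - 1) := by
  intro k
  induction k with
  | zero =>
    intro s hs hk
    have hge : (lines.length : Int) ≤ s := by omega
    rw [PySem.List.pyRange_one_eq_nil hge, List.drop_eq_nil_of_le (by omega)]
    rfl
  | succ k ih =>
    intro s hs hk
    have hlt : s < (lines.length : Int) := by omega
    have hlt' : s.toNat < lines.length := by omega
    have hget : PySem.List.pyGetD lines s "" = lines[s.toNat] :=
      PySem.List.pyGetD_eq_getElem lines "" (by omega) hlt
    have hnat : (s + 1).toNat = s.toNat + 1 := by omega
    have hdj : lines.drop s.toNat = lines[s.toNat] :: lines.drop (s.toNat + 1) :=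
      List.drop_eq_getElem_cons hlt'
    rw [PySem.List.pyRange_one_cons hlt, List.filter_cons, hdj]
    by_cases hb : PySem.Str.isIn "{" lines[s.toNat] = true
    · -- line s opens the section: both sides scan balances from s
      rw [if_pos (by simpa [hget] using hb)]
      have hb' : PySem.Chars.isIn ['{'] lines[s.toNat].toList = true := by simpa using hb
      have hL : (pvStepA (lines[s.toNat] :: lines.drop (s.toNat + 1)) s (0, false, none)).2.2
          = pvGoC (lines[s.toNat] :: lines.drop (s.toNat + 1)) s 0 := by
        by_cases h0 : pvDelta lines[s.toNat] = 0
        · simp [pvStepA, pvGoC, hb', h0, pvStepA_some]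
        · simp [pvStepA, pvGoC, hb', h0, pvStepA_true]
      rw [hL, pvGoC_index, ← hdj]
      show (match (PySem.List.index? (pvBals (lines.drop s.toNat) 0) 0).map
              (fun (k : Nat) => s + (k : Int)) with
            | some i => i
            | none => (lines.length : Int) - 1)
          = (match PySem.List.index? (pvBals (lines.drop s.toNat) 0) 0 with
             | some k => s + (k : Int)
             | none => (lines.length : Int) - 1)
      cases PySem.List.index? (pvBals (lines.drop s.toNat) 0) 0 with
      | none => rfl
      | some k => rfl
    · -- line s has no '{': both sides move on to s+1
      rw [if_neg (by simpa [hget] using hb)]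
      have hb' : PySem.Chars.isIn ['{'] lines[s.toNat].toList = false := by simpa using hb
      have hstep : pvStepA (lines[s.toNat] :: lines.drop (s.toNat + 1)) s (0, false, none)
          = pvStepA (lines.drop (s.toNat + 1)) (s + 1) (0, false, none) := by
        simp [pvStepA, hb']
      rw [hstep, ← hnat]
      exact ih (s + 1) (by omega) (by omega)

-- ===== VERDICT (by name: the statement is the Claim_ definition above) =====
theorem find_section_end_spec : Claim_equal_find_section_end := by
  unfold Claim_equal_find_section_end
  intro lines s _ hpre
  unfold Spec_find_section_end find_section_end find_section_end_alt
  have hs : (0 : Int) ≤ s := hpre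
  by_cases hge : s ≥ (lines.length : Int)
  · rw [if_pos hge, if_pos hge]
  · rw [if_neg hge, if_neg hge]
    rw [pvBridgeA lines (lines.length - s.toNat) s (0, false, none) hs rfl,
      pvMain lines (lines.length - s.toNat) s hs rfl]
    cases hh : (PySem.List.pyRange s (lines.length : Int) 1).filter
        (fun i => PySem.Str.isIn "{" (PySem.List.pyGetD lines i "")) with
    | nil => rfl
    | cons j t =>
      have hjmem : j ∈ PySem.List.pyRange s (lines.length : Int) 1 := by
        have : j ∈ (PySem.List.pyRange s (lines.length : Int) 1).filter
            (fun i => PySem.Str.isIn "{" (PySem.List.pyGetD lines i "")) := by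
          rw [hh]; exact List.mem_cons_self
        exact List.mem_of_mem_filter this
      have hj : 0 ≤ j := by
        have := (PySem.List.mem_pyRange_one.mp hjmem).1; omega
      show (match PySem.List.index? (pvBals (lines.drop j.toNat) 0) 0 with
            | some k => j + (k : Int)
            | none => (lines.length : Int) - 1)
          = (let balances := ((PySem.List.slice lines (some j) none).foldl fsbAcc ([], 0)).1
             match PySem.List.index? balances 0 with
             | some k => j + (k : Int)
             | none => (lines.length : Int) - 1)
      rw [PySem.List.slice_from lines hj, pvBalsFold]
      simp
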